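-- pv_equiv track=rewrite | github.com/Biboulet/AdventOfCode2021 | Exercice/18/exercice.py | get_deepest_pair
-- ===== SOURCE A (Python) =====
-- def get_deepest_pair(string):
--     depth = 0
--     deepest = 0
--     pair_start = None
--     for i, char in enumerate(string):
--         if char == "[":
--             depth += 1
--         elif char == "]":
--             depth -= 1
--
--         if depth > 4:
--             if deepest < depth:
--                 deepest = depth
--                 pair_start = i
--
--     return pair_start, string.find("]", pair_start)
-- ===== SOURCE B (Python) =====
-- def get_deepest_pair(string):
--     depths = []
--     d = 0
--     for char in string:
--         if char == "[":
--             d += 1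
--         elif char == "]":
--             d -= 1
--         depths.append(d)
--     pair_start = None
--     if depths:
--         m = max(depths)
--         if m > 4:
--             pair_start = depths.index(m)
--     return pair_start, string.find("]", pair_start)
-- ===== Notes on version B (the rewrite author's own statement) =====
-- stated objective: alternative
-- what changed: Replaces the interleaved track-record-high loop (depth/deepest/pair_start updated together) with a two-phase shape: one pass builds the running-depth list, then max() and .index() locate the first index of the maximum depth when it exceeds 4.
import Mathlib
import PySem

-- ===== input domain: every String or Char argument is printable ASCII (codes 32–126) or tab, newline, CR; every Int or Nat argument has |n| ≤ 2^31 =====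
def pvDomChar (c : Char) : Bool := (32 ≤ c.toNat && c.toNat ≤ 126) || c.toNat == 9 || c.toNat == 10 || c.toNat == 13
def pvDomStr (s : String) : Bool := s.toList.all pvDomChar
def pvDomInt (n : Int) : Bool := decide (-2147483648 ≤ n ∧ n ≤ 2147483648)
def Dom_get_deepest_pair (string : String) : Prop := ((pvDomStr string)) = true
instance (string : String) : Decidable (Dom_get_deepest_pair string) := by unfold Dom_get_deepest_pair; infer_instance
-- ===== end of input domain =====

-- B replaces A's interleaved record-tracking loop with a two-phase shape (build the
-- running-depth list, then max()/.index()); objective: alternative decomposition, same cost.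

-- ===== PORT A =====
-- the for-loop over enumerate(string) with state (depth, deepest, pair_start)
def pvALoop : List Char → Int → Int → Int → Option Int → Int × Option Int
  | [], _, _, deepest, ps => (deepest, ps)
  | c :: rest, i, depth, deepest, ps =>
      let depth' := if c = '[' then depth + 1 else if c = ']' then depth - 1 else depth
      if 4 < depth' then
        if deepest < depth' then pvALoop rest (i + 1) depth' depth' (some i)
        else pvALoop rest (i + 1) depth' deepest ps
      else pvALoop rest (i + 1) depth' deepest ps

def get_deepest_pair (string : String) : Option Int × Int :=
  let r := pvALoop string.toList 0 0 0 none
  -- string.find("]", pair_start): a None start means "from the beginning"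
  (r.2, match r.2 with
        | none => PySem.Str.find string "]"
        | some k => PySem.Str.findFrom string "]" k none)

-- ===== PORT B =====
-- phase 1 of Source B: the running-depth list (depths.append(d) for each char)
def pvDepths : Int → List Char → List Int
  | _, [] => []
  | d, c :: rest =>
      let d' := if c = '[' then d + 1 else if c = ']' then d - 1 else d
      d' :: pvDepths d' rest

def get_deepest_pair_alt (string : String) : Option Int × Int :=
  let depths := pvDepths 0 string.toList
  -- phase 2 of Source B: m = max(depths); pair_start = depths.index(m) if m > 4
  let ps : Option Int :=
    match PySem.List.max? depths (fun x => x) with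
    | none => none
    | some m =>
        if 4 < m then
          match PySem.List.index? depths m with
          | none => none
          | some k => some ((k : Int))
        else none
  (ps, match ps with
       | none => PySem.Str.find string "]"
       | some k => PySem.Str.findFrom string "]" k none)

-- ===== PRECONDITION & SPEC =====
def Spec_get_deepest_pair (string : String) (out : Option Int × Int) : Prop := out = get_deepest_pair_alt string
instance (string : String) (out : Option Int × Int) : Decidable (Spec_get_deepest_pair string out) := by unfold Spec_get_deepest_pair; infer_instance

-- ===== CLAIM (what is proved, stated in full; the proofs are below) =====
def Claim_equal_get_deepest_pair : Prop := ∀ (string : String), Dom_get_deepest_pair string → Spec_get_deepest_pair string (get_deepest_pair string)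

-- ===== LEMMAS AND PROOFS =====

-- proof-side helpers: max of a nonempty list, and the (Int) index of the first occurrence
def pvMaxOf : List Int → Int
  | [] => 0
  | x :: xs => xs.foldl max x

def pvFirstIdx : List Int → Int → Int
  | [], _ => 0
  | x :: xs, m => if x = m then 0 else 1 + pvFirstIdx xs m

theorem pv_le_maxOf (xs : List Int) : ∀ x ∈ xs, x ≤ pvMaxOf xs := by
  cases xs with
  | nil => simp
  | cons a t =>
      intro x hx
      rcases List.mem_cons.mp hx with rfl | h
      · exact (PySem.List.le_foldl_max t x).1
      · exact (PySem.List.le_foldl_max t a).2 x h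

theorem pv_maxOf_mem (xs : List Int) (h : xs ≠ []) : pvMaxOf xs ∈ xs := by
  cases xs with
  | nil => simp at h
  | cons a t =>
      rcases PySem.List.foldl_max_mem t a with h1 | h1
      · simp [pvMaxOf, h1]
      · simp only [pvMaxOf]; exact List.mem_cons_of_mem _ h1

theorem pv_maxOf_cons_le (d : Int) (ds : List Int) (h : ∀ x ∈ ds, x ≤ d) :
    pvMaxOf (d :: ds) = d := by
  rcases pv_maxOf_mem (d :: ds) (by simp) with hm
  have h1 : d ≤ pvMaxOf (d :: ds) := pv_le_maxOf _ d (by simp)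
  rcases List.mem_cons.mp hm with he | he
  · exact he.symm ▸ rfl
  · exact le_antisymm (h _ he) h1

theorem pv_maxOf_cons_lt (d : Int) (ds : List Int) (x : Int) (hx : x ∈ ds) (hlt : d < x) :
    pvMaxOf (d :: ds) = pvMaxOf ds ∧ d < pvMaxOf ds := by
  have hxle : x ≤ pvMaxOf ds := pv_le_maxOf ds x hx
  have hdlt : d < pvMaxOf ds := lt_of_lt_of_le hlt hxle
  have hxle2 : x ≤ pvMaxOf (d :: ds) := pv_le_maxOf _ x (List.mem_cons_of_mem _ hx)
  have hle : pvMaxOf ds ≤ pvMaxOf (d :: ds) :=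
    pv_le_maxOf _ _ (List.mem_cons_of_mem _ (pv_maxOf_mem ds (by rintro rfl; simp at hx)))
  rcases List.mem_cons.mp (pv_maxOf_mem (d :: ds) (by simp)) with he | he
  · omega
  · exact ⟨le_antisymm (pv_le_maxOf ds _ he) hle, hdlt⟩

-- the invariant of A's loop: it returns its incoming record unless some depth in the
-- suffix beats both the record and 4, in which case it returns the suffix max and the
-- position of its first occurrence.
theorem pvALoop_spec (l : List Char) : ∀ (i d deepest : Int) (ps : Option Int),
    pvALoop l i d deepest ps =
      (if _h : ∃ x ∈ pvDepths d l, deepest < x ∧ 4 < x then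
         (pvMaxOf (pvDepths d l), some (i + pvFirstIdx (pvDepths d l) (pvMaxOf (pvDepths d l))))
       else (deepest, ps)) := by
  induction l with
  | nil => intro i d deepest ps; simp [pvALoop, pvDepths]
  | cons c rest ih =>
      intro i d deepest ps
      simp only [pvALoop, pvDepths]
      set d' := if c = '[' then d + 1 else if c = ']' then d - 1 else d with hd'
      set ds' := pvDepths d' rest with hds'
      by_cases hrec : 4 < d' ∧ deepest < d'
      · rw [if_pos hrec.1, if_pos hrec.2, ih]
        by_cases hex : ∃ x ∈ ds', d' < x ∧ 4 < x
        · rcases hex with ⟨x, hx, hxd, hx4⟩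
          obtain ⟨hM, hlt⟩ := pv_maxOf_cons_lt d' ds' x hx hxd
          have hcond : ∃ y ∈ d' :: ds', deepest < y ∧ 4 < y :=
            ⟨x, List.mem_cons_of_mem _ hx, lt_trans hrec.2 hxd, hx4⟩
          rw [dif_pos ⟨x, hx, hxd, hx4⟩, dif_pos hcond, hM]
          simp only [pvFirstIdx, if_neg (by omega : ¬ d' = pvMaxOf ds')]
          refine Prod.ext rfl ?_
          simp only [Option.some.injEq]; ring
        · have hall : ∀ x ∈ ds', x ≤ d' := by
            intro x hx
            by_contra hc
            exact hex ⟨x, hx, by omega, by omega⟩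
          have hM : pvMaxOf (d' :: ds') = d' := pv_maxOf_cons_le d' ds' hall
          have hcond : ∃ y ∈ d' :: ds', deepest < y ∧ 4 < y :=
            ⟨d', List.mem_cons_self, hrec.2, hrec.1⟩
          rw [dif_neg hex, dif_pos hcond, hM]
          simp [pvFirstIdx]
      · have hstep : (if 4 < d' then
              (if deepest < d' then pvALoop rest (i + 1) d' d' (some i)
               else pvALoop rest (i + 1) d' deepest ps)
            else pvALoop rest (i + 1) d' deepest ps) = pvALoop rest (i + 1) d' deepest ps := by
          split_ifs with h1 h2
          · exact absurd ⟨h1, h2⟩ hrec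
          · rfl
          · rfl
        rw [hstep, ih]
        have hiff : (∃ x ∈ d' :: ds', deepest < x ∧ 4 < x) ↔ (∃ x ∈ ds', deepest < x ∧ 4 < x) := by
          constructor
          · rintro ⟨x, hx, h1, h2⟩
            rcases List.mem_cons.mp hx with rfl | hx
            · exact absurd ⟨h2, h1⟩ hrec
            · exact ⟨x, hx, h1, h2⟩
          · rintro ⟨x, hx, h1, h2⟩
            exact ⟨x, List.mem_cons_of_mem _ hx, h1, h2⟩
        by_cases hex : ∃ x ∈ ds', deepest < x ∧ 4 < x
        · rcases hex with ⟨x, hx, h1, h2⟩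
          have hxd : d' < x := by rcases not_and_or.mp hrec with h | h <;> omega
          obtain ⟨hM, hlt⟩ := pv_maxOf_cons_lt d' ds' x hx hxd
          rw [dif_pos ⟨x, hx, h1, h2⟩, dif_pos (hiff.mpr ⟨x, hx, h1, h2⟩), hM]
          simp only [pvFirstIdx, if_neg (by omega : ¬ d' = pvMaxOf ds')]
          refine Prod.ext rfl ?_
          simp only [Option.some.injEq]; ring
        · rw [dif_neg hex, dif_neg (fun hh => hex (hiff.mp hh))]

-- index? finds the first occurrence: it agrees with pvFirstIdx on members
theorem pv_index?_eq_firstIdx (xs : List Int) (m : Int) (h : m ∈ xs) :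
    ∃ k : Nat, PySem.List.index? xs m = some k ∧ (k : Int) = pvFirstIdx xs m := by
  induction xs with
  | nil => simp at h
  | cons x t ih =>
      by_cases hx : x = m
      · subst hx
        exact ⟨0, PySem.List.index?_cons_self x t, by simp [pvFirstIdx]⟩
      · have hm : m ∈ t := by
          rcases List.mem_cons.mp h with he | he
          · exact absurd he.symm hx
          · exact he
        obtain ⟨k, hk, hke⟩ := ih hm
        refine ⟨k + 1, ?_, ?_⟩
        · rw [PySem.List.index?_cons_of_ne t hx, hk]; rfl
        · simp only [pvFirstIdx, if_neg hx]
          push_cast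
          omega

-- B's pair_start equals A's
theorem pv_ps_eq (l : List Char) :
    (pvALoop l 0 0 0 none).2 =
      (match PySem.List.max? (pvDepths 0 l) (fun x => x) with
       | none => none
       | some m =>
           if 4 < m then
             match PySem.List.index? (pvDepths 0 l) m with
             | none => none
             | some k => some ((k : Int))
           else none) := by
  rw [pvALoop_spec]
  cases hc : pvDepths 0 l with
  | nil => simp [PySem.List.max?]
  | cons y ys =>
      rw [PySem.List.max?_id_cons]
      have hmax : ys.foldl max y = pvMaxOf (y :: ys) := rfl
      rw [hmax]
      by_cases h4 : 4 < pvMaxOf (y :: ys)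
      · have hmem : pvMaxOf (y :: ys) ∈ (y :: ys) := pv_maxOf_mem _ (by simp)
        have hex : ∃ x ∈ y :: ys, (0 : Int) < x ∧ 4 < x :=
          ⟨pvMaxOf (y :: ys), hmem, by omega, h4⟩
        obtain ⟨k, hk, hke⟩ := pv_index?_eq_firstIdx (y :: ys) _ hmem
        rw [dif_pos hex]
        rw [PySem.List.index?_eq_idxOf?] at hk
        simp [hk, h4, ← hke]
      · have hex : ¬ ∃ x ∈ y :: ys, (0 : Int) < x ∧ 4 < x := by
          rintro ⟨x, hx, h1, h2⟩
          have := pv_le_maxOf (y :: ys) x hx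
          omega
        rw [dif_neg hex]
        simp [h4]

-- ===== VERDICT (by name: the statement is the Claim_ definition above) =====
theorem get_deepest_pair_spec : Claim_equal_get_deepest_pair := by
  intro string _
  unfold Spec_get_deepest_pair get_deepest_pair get_deepest_pair_alt
  simp only
  rw [pv_ps_eq]
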